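-- pv_equiv track=rewrite | github.com/luca-zamboni/distalgoproject | ProjCyclon/analysis/analysis.py | self_cleaning_capacity
-- ===== SOURCE A (Python) =====
-- def marked_peers(data,signal="dead") :
--
-- 	marked_set = set()
--
-- 	for i in data :
-- 		if i[-1] == signal :
-- 			marked_set.add(i[0])
--
-- 	return marked_set
--
-- def self_cleaning_capacity(data) :
--
-- 	dead_peers = marked_peers(data)
--
-- 	founded_peers = set()
--
-- 	for i in data :
-- 		if not i[0] in dead_peers :
--
-- 			for j in i[1:] :
-- 				if j in dead_peers :
-- 					founded_peers.add(j)
--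
-- 	return len(founded_peers)
-- ===== SOURCE B (Python) =====
-- def self_cleaning_capacity(data):
--     dead = {row[0] for row in data if row[-1] == "dead"}
--     count = 0
--     for d in dead:
--         if any(d in row[1:] for row in data if row[0] not in dead):
--             count += 1
--     return count
-- ===== Notes on version B (the rewrite author's own statement) =====
-- stated objective: alternative
-- what changed: B inverts the loop structure: instead of A's nested scan over rows that accumulates a 'founded' set of dead neighbors, B loops over each dead peer and counts it if a short-circuiting any-scan finds it in some live row's tail, maintaining only an integer counter and no result set; Pre_ excludes inputs containing an empty inner list, on which A raises IndexError at row[-1].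
import Mathlib
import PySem

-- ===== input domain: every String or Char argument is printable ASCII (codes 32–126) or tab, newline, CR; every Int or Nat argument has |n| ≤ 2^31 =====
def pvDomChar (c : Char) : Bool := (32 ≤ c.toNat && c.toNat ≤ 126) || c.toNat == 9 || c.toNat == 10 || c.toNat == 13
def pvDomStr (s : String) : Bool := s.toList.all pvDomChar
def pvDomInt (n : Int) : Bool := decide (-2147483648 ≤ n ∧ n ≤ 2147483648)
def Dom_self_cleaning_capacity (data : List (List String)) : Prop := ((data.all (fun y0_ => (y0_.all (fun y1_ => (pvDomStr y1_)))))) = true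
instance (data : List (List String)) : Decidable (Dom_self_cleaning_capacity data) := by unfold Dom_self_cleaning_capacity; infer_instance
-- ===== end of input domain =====

-- B inverts the loops (per-dead-peer existential scan with a plain counter, no accumulated set); equivalence of the RETURN value on inputs with no empty inner list.

-- ===== PORT A =====
-- helper marked_peers(data, signal="dead") of A, literal
def markedPeers (data : List (List String)) (signal : String) : PySem.Set String :=
  data.foldl
    (fun s i =>
      if PySem.List.pyGetD i (-1) "" == signal then PySem.Set.add s (PySem.List.pyGetD i 0 "") else s)
    PySem.Set.empty

def self_cleaning_capacity (data : List (List String)) : Int :=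
  let deadPeers := markedPeers data "dead"
  let foundedPeers :=
    data.foldl
      (fun f i =>
        if !(PySem.Set.contains deadPeers (PySem.List.pyGetD i 0 "")) then
          (PySem.List.slice i (some 1) none).foldl
            (fun f j => if PySem.Set.contains deadPeers j then PySem.Set.add f j else f) f
        else f)
      PySem.Set.empty
  (foundedPeers.length : Int)

-- ===== PORT B =====
-- counting loop over the dead set; the count is independent of Python's set iteration order
def self_cleaning_capacity_alt (data : List (List String)) : Int :=
  let dead : PySem.Set String :=
    PySem.Set.ofList
      ((data.filter (fun row => PySem.List.pyGetD row (-1) "" == "dead")).map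
        (fun row => PySem.List.pyGetD row 0 ""))
  dead.foldl
    (fun c d =>
      if data.any (fun row =>
            (!(PySem.Set.contains dead (PySem.List.pyGetD row 0 ""))) &&
            (PySem.List.slice row (some 1) none).contains d)
      then c + 1 else c)
    (0 : Int)

-- ===== PRECONDITION & SPEC =====
-- Pre_ excludes inputs containing an empty inner list: there A raises IndexError at row[-1] (and B too).
def Pre_self_cleaning_capacity (data : List (List String)) : Prop := ∀ i ∈ data, i ≠ []
instance (data : List (List String)) : Decidable (Pre_self_cleaning_capacity data) := by
  unfold Pre_self_cleaning_capacity; infer_instance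

def pvWitness_self_cleaning_capacity : List (List String) :=
  [["a", "b", "dead"], ["b", "a", "alive"]]

def Spec_self_cleaning_capacity (data : List (List String)) (out : Int) : Prop := out = self_cleaning_capacity_alt data
instance (data : List (List String)) (out : Int) : Decidable (Spec_self_cleaning_capacity data out) := by unfold Spec_self_cleaning_capacity; infer_instance

-- ===== CLAIM (what is proved, stated in full; the proofs are below) =====
def Claim_equal_self_cleaning_capacity : Prop := ∀ (data : List (List String)), Dom_self_cleaning_capacity data → Pre_self_cleaning_capacity data → Spec_self_cleaning_capacity data (self_cleaning_capacity data)

-- ===== LEMMAS AND PROOFS =====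

-- A's conditional-add foldl equals ofList of the mapped filter.
theorem foldl_if_add_eq_ofList_map_filter {α : Type} [BEq α] [LawfulBEq α]
    (data : List (List String)) (c : List String → Bool) (f : List String → α) (s : PySem.Set α) :
    data.foldl (fun s i => if c i then PySem.Set.add s (f i) else s) s
      = ((data.filter c).map f).foldl PySem.Set.add s := by
  induction data generalizing s with
  | nil => rfl
  | cons x xs ih =>
    by_cases h : c x <;> simp [h, ih]

theorem dead_eq (data : List (List String)) :
    markedPeers data "dead"
      = PySem.Set.ofList
          ((data.filter (fun i => PySem.List.pyGetD i (-1) "" == "dead")).map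
            (fun i => PySem.List.pyGetD i 0 "")) := by
  rw [PySem.Set.ofList_eq_foldl]
  exact foldl_if_add_eq_ofList_map_filter data _ _ _

-- B's counting loop is the length of the filtered list.
theorem foldl_count_eq_filter_length {α : Type} (l : List α) (p : α → Bool) (c : Int) :
    l.foldl (fun c d => if p d then c + 1 else c) c = c + (l.filter p).length := by
  induction l generalizing c with
  | nil => simp
  | cons x xs ih =>
    by_cases h : p x <;> simp [h, ih] <;> ring

-- inner loop of A: membership
theorem mem_inner_foldl {α : Type} [BEq α] [LawfulBEq α]
    (l : List α) (dead f : PySem.Set α) (x : α) :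
    x ∈ l.foldl (fun f j => if PySem.Set.contains dead j then PySem.Set.add f j else f) f
      ↔ x ∈ f ∨ (x ∈ l ∧ x ∈ dead) := by
  induction l generalizing f with
  | nil => simp
  | cons y ys ih =>
    simp only [List.foldl_cons]
    by_cases h : PySem.Set.contains dead y = true
    · have hy : y ∈ dead := (PySem.Set.contains_iff dead y).mp h
      rw [if_pos h, ih]
      simp only [PySem.Set.mem_add, List.mem_cons]
      constructor
      · rintro ((hx | rfl) | ⟨hm, hd⟩)
        · exact Or.inl hx
        · exact Or.inr ⟨Or.inl rfl, hy⟩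
        · exact Or.inr ⟨Or.inr hm, hd⟩
      · rintro (hx | ⟨rfl | hm, hd⟩)
        · exact Or.inl (Or.inl hx)
        · exact Or.inl (Or.inr rfl)
        · exact Or.inr ⟨hm, hd⟩
    · have hy : y ∉ dead := fun hm => h ((PySem.Set.contains_iff dead y).mpr hm)
      rw [if_neg h, ih]
      simp only [List.mem_cons]
      constructor
      · rintro (hx | ⟨hm, hd⟩)
        · exact Or.inl hx
        · exact Or.inr ⟨Or.inr hm, hd⟩
      · rintro (hx | ⟨rfl | hm, hd⟩)
        · exact Or.inl hx
        · exact absurd hd hy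
        · exact Or.inr ⟨hm, hd⟩

theorem nodup_inner_foldl {α : Type} [BEq α] [LawfulBEq α]
    (l : List α) (dead f : PySem.Set α) (hf : f.Nodup) :
    (l.foldl (fun f j => if PySem.Set.contains dead j then PySem.Set.add f j else f) f).Nodup := by
  induction l generalizing f with
  | nil => exact hf
  | cons y ys ih =>
    simp only [List.foldl_cons]
    split
    · exact ih _ (PySem.Set.nodup_add _ _ hf)
    · exact ih _ hf

-- outer loop of A: membership
theorem mem_founded (data : List (List String)) (dead f : PySem.Set String) (x : String) :
    x ∈ data.foldl
        (fun f i =>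
          if !(PySem.Set.contains dead (PySem.List.pyGetD i 0 "")) then
            (PySem.List.slice i (some 1) none).foldl
              (fun f j => if PySem.Set.contains dead j then PySem.Set.add f j else f) f
          else f) f
      ↔ x ∈ f ∨ ∃ i ∈ data, (!(PySem.Set.contains dead (PySem.List.pyGetD i 0 ""))) = true
          ∧ x ∈ PySem.List.slice i (some 1) none ∧ x ∈ dead := by
  induction data generalizing f with
  | nil => simp
  | cons y ys ih =>
    simp only [List.foldl_cons, List.mem_cons]
    by_cases h : (!(PySem.Set.contains dead (PySem.List.pyGetD y 0 ""))) = true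
    · rw [if_pos h, ih, mem_inner_foldl]
      constructor
      · rintro ((hx | ⟨hs, hd⟩) | ⟨i, hi, hc, hs, hd⟩)
        · exact Or.inl hx
        · exact Or.inr ⟨y, Or.inl rfl, h, hs, hd⟩
        · exact Or.inr ⟨i, Or.inr hi, hc, hs, hd⟩
      · rintro (hx | ⟨i, rfl | hi, hc, hs, hd⟩)
        · exact Or.inl (Or.inl hx)
        · exact Or.inl (Or.inr ⟨hs, hd⟩)
        · exact Or.inr ⟨i, hi, hc, hs, hd⟩
    · rw [if_neg h, ih]
      constructor
      · rintro (hx | ⟨i, hi, hc, hs, hd⟩)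
        · exact Or.inl hx
        · exact Or.inr ⟨i, Or.inr hi, hc, hs, hd⟩
      · rintro (hx | ⟨i, rfl | hi, hc, hs, hd⟩)
        · exact Or.inl hx
        · exact absurd hc h
        · exact Or.inr ⟨i, hi, hc, hs, hd⟩

theorem nodup_founded (data : List (List String)) (dead f : PySem.Set String) (hf : f.Nodup) :
    (data.foldl
        (fun f i =>
          if !(PySem.Set.contains dead (PySem.List.pyGetD i 0 "")) then
            (PySem.List.slice i (some 1) none).foldl
              (fun f j => if PySem.Set.contains dead j then PySem.Set.add f j else f) f
          else f) f).Nodup := by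
  induction data generalizing f with
  | nil => exact hf
  | cons y ys ih =>
    simp only [List.foldl_cons]
    split
    · exact ih _ (nodup_inner_foldl _ _ _ hf)
    · exact ih _ hf

-- ===== VERDICT (by name: the statement is the Claim_ definition above) =====
theorem self_cleaning_capacity_spec : Claim_equal_self_cleaning_capacity := by
  intro data _ _
  unfold Spec_self_cleaning_capacity
  simp only [self_cleaning_capacity, self_cleaning_capacity_alt, dead_eq]
  set dead := PySem.Set.ofList
      ((data.filter (fun i => PySem.List.pyGetD i (-1) "" == "dead")).map
        (fun i => PySem.List.pyGetD i 0 "")) with hdead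
  rw [foldl_count_eq_filter_length]
  rw [zero_add]
  apply congrArg
  apply List.Perm.length_eq
  apply (List.perm_ext_iff_of_nodup
    (nodup_founded data _ _ (by simp [PySem.Set.empty]))
    ((PySem.Set.nodup_ofList _).filter _)).mpr
  intro x
  rw [mem_founded]
  simp only [PySem.Set.empty, List.not_mem_nil, false_or, List.mem_filter, List.any_eq_true,
    Bool.and_eq_true, List.contains_iff_mem]
  constructor
  · rintro ⟨i, hi, hc, hs, hd⟩
    exact ⟨hd, i, hi, hc, hs⟩
  · rintro ⟨hd, i, hi, hc, hs⟩
    exact ⟨i, hi, hc, hs, hd⟩
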